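-- pv_equiv track=rewrite | github.com/tonghuikang/meta-ai-hackercup-2024 | execution_code/duplicate_order/024.py | partial_binomial_sum
-- ===== SOURCE A (Python) =====
-- MOD = 10**9 +7
--
-- def partial_binomial_sum(n, k, a, factorial, inv_fact):
--     # Computes sum_{c=0}^k C(n, c) * a^c mod MOD
--     # Using iterative approach
--     result = 0
--     term = 1  # C(n,0) * a^0
--     for c in range(0, k+1):
--         result = (result + term) % MOD
--         if c ==k:
--             break
--         # Compute term * (n -c) / (c+1) *a mod MOD
--         term = term * (n -c) % MOD
--         inv = pow(c +1, MOD-2, MOD)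
--         term = term * inv % MOD
--         term = term * a % MOD
--     return result
-- ===== SOURCE B (Python) =====
-- MOD = 10**9 + 7
--
-- def partial_binomial_sum(n, k, a, factorial, inv_fact):
--     # Direct closed-form terms: C(n,c)*a^c = falling(n,c) * inverse(c!) * a^c,
--     # maintained as three independent running products; the inverse is taken
--     # of the whole running factorial instead of factor by factor.
--     result = 0
--     fall = 1   # product_{i<c} (n - i)  mod MOD
--     fact = 1   # c!                     mod MOD
--     apow = 1   # a^c                    mod MOD
--     for c in range(k + 1):
--         result = (result + fall * pow(fact, MOD - 2, MOD) % MOD * apow) % MOD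
--         fall = fall * (n - c) % MOD
--         fact = fact * (c + 1) % MOD
--         apow = apow * a % MOD
--     return result
-- ===== Notes on version B (the rewrite author's own statement) =====
-- stated objective: alternative
-- what changed: A updates a single term by the multiplicative recurrence term *= (n-c) * inverse(c+1) * a; B instead maintains three independent running products (falling factorial of n, c!, a^c) and assembles each term in closed form as fall * inverse(c!) * a^c, taking one modular inverse of the whole running factorial instead of accumulating per-step inverses.
import Mathlib
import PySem

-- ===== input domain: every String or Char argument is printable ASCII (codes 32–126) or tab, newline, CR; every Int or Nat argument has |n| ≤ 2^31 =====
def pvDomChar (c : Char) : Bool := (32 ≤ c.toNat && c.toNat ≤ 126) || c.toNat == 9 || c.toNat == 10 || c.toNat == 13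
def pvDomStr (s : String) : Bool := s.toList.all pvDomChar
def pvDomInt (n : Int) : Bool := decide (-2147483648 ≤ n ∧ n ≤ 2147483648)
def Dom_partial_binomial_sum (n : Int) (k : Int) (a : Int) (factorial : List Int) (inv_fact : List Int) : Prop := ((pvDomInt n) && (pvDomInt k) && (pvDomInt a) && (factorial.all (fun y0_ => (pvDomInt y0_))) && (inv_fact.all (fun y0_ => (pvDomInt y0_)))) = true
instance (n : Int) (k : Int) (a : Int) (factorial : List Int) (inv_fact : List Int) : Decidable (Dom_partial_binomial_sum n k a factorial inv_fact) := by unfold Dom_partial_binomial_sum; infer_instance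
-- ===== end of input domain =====

-- B replaces A's multiplicative term recurrence (term *= (n-c)*inv(c+1)*a) by assembling each
-- term from three independently maintained running products (falling factorial, c!, a^c), the
-- inverse taken of the whole running factorial; objective: alternative algorithm, same cost.
-- All '%' here are by the positive constant MOD = 10^9+7, where Lean's Int.emod coincides
-- exactly with Python's '%'.

-- ===== PORT A =====
def pvMOD : Int := 1000000007          -- MOD = 10**9 + 7
def pvE : Nat := 1000000007 - 2        -- the exponent MOD - 2 used by pow(·, MOD-2, MOD)

-- port of Python's builtin pow(b, e, m) (binary exponentiation; exact for m > 0, e ≥ 0)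
def pvPowmod (b : Int) (e : Nat) (m : Int) : Int :=
  if h : e = 0 then 1 % m
  else
    let hrec := pvPowmod b (e / 2) m
    if e % 2 = 0 then hrec * hrec % m
    else hrec * hrec % m * (b % m) % m
decreasing_by exact Nat.div_lt_self (Nat.pos_of_ne_zero h) one_lt_two

-- the for-loop of A over range(0, k+1), state (result, term); 'if c == k: break' kept as is
def pvLoopA (n : Int) (k : Int) (a : Int) : List Int → Int × Int → Int × Int
  | [], s => s
  | c :: rest, s =>
    let result := (s.1 + s.2) % pvMOD
    if c == k then (result, s.2)
    else
      let term := s.2 * (n - c) % pvMOD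
      let inv := pvPowmod (c + 1) pvE pvMOD
      let term := term * inv % pvMOD
      let term := term * a % pvMOD
      pvLoopA n k a rest (result, term)

def partial_binomial_sum (n : Int) (k : Int) (a : Int) (factorial : List Int) (inv_fact : List Int) : Int :=
  (pvLoopA n k a (PySem.List.pyRange 0 (k + 1) 1) (0, 1)).1

-- ===== PORT B =====
-- one iteration of B's loop, state (result, fall, fact, apow)
def pvStepB (n : Int) (a : Int) (s : Int × Int × Int × Int) (c : Int) : Int × Int × Int × Int :=
  ((s.1 + s.2.1 * pvPowmod s.2.2.1 pvE pvMOD % pvMOD * s.2.2.2) % pvMOD,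
   s.2.1 * (n - c) % pvMOD,
   s.2.2.1 * (c + 1) % pvMOD,
   s.2.2.2 * a % pvMOD)

def partial_binomial_sum_alt (n : Int) (k : Int) (a : Int) (factorial : List Int) (inv_fact : List Int) : Int :=
  ((PySem.List.pyRange 0 (k + 1) 1).foldl (pvStepB n a) (0, 1, 1, 1)).1

-- ===== PRECONDITION & SPEC =====
def Spec_partial_binomial_sum (n : Int) (k : Int) (a : Int) (factorial : List Int) (inv_fact : List Int) (out : Int) : Prop := out = partial_binomial_sum_alt n k a factorial inv_fact
instance (n : Int) (k : Int) (a : Int) (factorial : List Int) (inv_fact : List Int) (out : Int) : Decidable (Spec_partial_binomial_sum n k a factorial inv_fact out) := by unfold Spec_partial_binomial_sum; infer_instance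

-- ===== CLAIM (what is proved, stated in full; the proofs are below) =====
def Claim_equal_partial_binomial_sum : Prop := ∀ (n : Int) (k : Int) (a : Int) (factorial : List Int) (inv_fact : List Int), Dom_partial_binomial_sum n k a factorial inv_fact → Spec_partial_binomial_sum n k a factorial inv_fact (partial_binomial_sum n k a factorial inv_fact)

-- ===== LEMMAS AND PROOFS =====

theorem pvPowmod_eq (b : Int) (e : Nat) (m : Int) : pvPowmod b e m = b ^ e % m := by
  induction e using Nat.strong_induction_on with
  | _ e ih =>
    rw [pvPowmod]
    by_cases h : e = 0
    · simp [h]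
    · have hrec := ih (e / 2) (Nat.div_lt_self (Nat.pos_of_ne_zero h) one_lt_two)
      simp only [h, dite_false, hrec]
      by_cases hpar : e % 2 = 0
      · simp only [hpar, if_true]
        rw [← Int.mul_emod, ← pow_add, show e / 2 + e / 2 = e by omega]
      · simp only [hpar, if_false]
        rw [← Int.mul_emod (b ^ (e / 2)) (b ^ (e / 2)) m, ← Int.mul_emod,
          show b ^ (e / 2) * b ^ (e / 2) * b = b ^ (e / 2 + e / 2 + 1) by
            rw [← pow_add, ← pow_succ],
          show e / 2 + e / 2 + 1 = e by omega]

theorem pvMOD_eq : pvMOD = ((1000000007 : ℕ) : ℤ) := by norm_num [pvMOD]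

theorem pvCast_mod (x : ℤ) : ((x % pvMOD : ℤ) : ZMod 1000000007) = (x : ZMod 1000000007) := by
  rw [pvMOD_eq]; exact ZMod.intCast_mod x 1000000007

theorem pvMod_eq_of_cast {x y : ℤ} (h : (x : ZMod 1000000007) = (y : ZMod 1000000007)) :
    x % pvMOD = y % pvMOD := by
  rw [pvMOD_eq]; exact (ZMod.intCast_eq_intCast_iff x y 1000000007).mp h

theorem pvCast_of_mod {x y : ℤ} (h : x % pvMOD = y % pvMOD) :
    (x : ZMod 1000000007) = (y : ZMod 1000000007) := by
  have := congrArg (fun z : ℤ => (z : ZMod 1000000007)) h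
  simpa [pvCast_mod] using this

-- the result-update of A and of B produce the same value under the term invariant
theorem pvAdd_eq (r term fall fact apow : ℤ)
    (h : term % pvMOD = (fall * fact ^ pvE * apow) % pvMOD) :
    (r + term) % pvMOD = (r + fall * pvPowmod fact pvE pvMOD % pvMOD * apow) % pvMOD := by
  apply pvMod_eq_of_cast
  have h' := pvCast_of_mod h
  rw [pvPowmod_eq]
  push_cast [pvCast_mod] at h' ⊢
  rw [h']

theorem pvLoop_inv (n k a : Int) (l : List Int) (hk : ∀ c ∈ l, c ≠ k) :
    ∀ r term fall fact apow, term % pvMOD = (fall * fact ^ pvE * apow) % pvMOD →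
    (pvLoopA n k a l (r, term)).1 = (l.foldl (pvStepB n a) (r, fall, fact, apow)).1 ∧
    (pvLoopA n k a l (r, term)).2 % pvMOD =
      ((l.foldl (pvStepB n a) (r, fall, fact, apow)).2.1 *
        (l.foldl (pvStepB n a) (r, fall, fact, apow)).2.2.1 ^ pvE *
        (l.foldl (pvStepB n a) (r, fall, fact, apow)).2.2.2) % pvMOD := by
  induction l with
  | nil => intro r term fall fact apow h; simpa [pvLoopA] using h
  | cons c rest ih =>
    intro r term fall fact apow h
    have hc : c ≠ k := hk c (by simp)
    have hk' : ∀ x ∈ rest, x ≠ k := fun x hx => hk x (by simp [hx])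
    simp only [pvLoopA, List.foldl_cons, beq_iff_eq, hc, if_false, pvStepB]
    rw [pvAdd_eq r term fall fact apow h]
    apply ih hk'
    -- new-term invariant
    apply pvMod_eq_of_cast
    have h' := pvCast_of_mod h
    rw [pvPowmod_eq]
    push_cast [pvCast_mod] at h' ⊢
    rw [h', mul_pow]; ring

theorem pvLoopA_append (n k a : Int) (l₁ l₂ : List Int) (hk : ∀ c ∈ l₁, c ≠ k) (s : Int × Int) :
    pvLoopA n k a (l₁ ++ l₂) s = pvLoopA n k a l₂ (pvLoopA n k a l₁ s) := by
  induction l₁ generalizing s with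
  | nil => simp [pvLoopA]
  | cons c rest ih =>
    have hc : c ≠ k := hk c (by simp)
    simp only [List.cons_append, pvLoopA, beq_iff_eq, hc, if_false]
    exact ih (fun x hx => hk x (by simp [hx])) _

-- ===== VERDICT (by name: the statement is the Claim_ definition above) =====
theorem partial_binomial_sum_spec : Claim_equal_partial_binomial_sum := by
  intro n k a factorial inv_fact _
  unfold Spec_partial_binomial_sum partial_binomial_sum partial_binomial_sum_alt
  by_cases hk : 0 ≤ k
  · rw [PySem.List.pyRange_one_succ_right hk, List.foldl_append,
      pvLoopA_append n k a _ _ (fun c hc => by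
        have := (PySem.List.mem_pyRange_one.mp hc).2; omega)]
    obtain ⟨h1, h2⟩ := pvLoop_inv n k a (PySem.List.pyRange 0 k 1)
      (fun c hc => by have := (PySem.List.mem_pyRange_one.mp hc).2; omega)
      0 1 1 1 1 (by norm_num)
    set sA := pvLoopA n k a (PySem.List.pyRange 0 k 1) (0, 1) with hsA
    set sB := (PySem.List.pyRange 0 k 1).foldl (pvStepB n a) (0, 1, 1, 1) with hsB
    simp only [pvLoopA, List.foldl_cons, List.foldl_nil, beq_self_eq_true, if_true, pvStepB]
    rw [h1]
    exact pvAdd_eq sB.1 sA.2 sB.2.1 sB.2.2.1 sB.2.2.2 h2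
  · rw [PySem.List.pyRange_one_eq_nil (by omega)]
    simp [pvLoopA]
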